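-- pv_equiv track=rewrite | github.com/alexeybutyrev/codeforcessolutions | 1553D.py | solution
-- ===== SOURCE A (Python) =====
-- def solution(s, t):
--     if not t:
--         return "YES"
--     n, m = len(s), len(t)
--     if n < m:
--         return "NO"
--
--     q = k = 0
--     for i in range((n - m) & 1, n):
--         if k == 1:
--             k = 0
--             continue
--         if q < m and s[i] == t[q]:
--             q += 1
--         else:
--             k += 1
--
--     return "YES" if q == m else "NO"
-- ===== SOURCE B (Python) =====
-- def solution(s, t):
--     if not t:
--         return "YES"
--     i, j = len(s) - 1, len(t) - 1
--     while i >= 0: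
--         if j >= 0 and s[i] == t[j]:
--             i -= 1
--             j -= 1
--         else:
--             i -= 2
--     return "YES" if j < 0 else "NO"
-- ===== Notes on version B (the rewrite author's own statement) =====
-- stated objective: simpler
-- what changed: A's forward scan with a parity offset (n-m)&1 and a skip-toggle flag is replaced by a backward two-pointer greedy (match s[i] with t[j] from the ends, else step i by 2), which handles the parity rule implicitly and needs no offset or toggle state.
import Mathlib
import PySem

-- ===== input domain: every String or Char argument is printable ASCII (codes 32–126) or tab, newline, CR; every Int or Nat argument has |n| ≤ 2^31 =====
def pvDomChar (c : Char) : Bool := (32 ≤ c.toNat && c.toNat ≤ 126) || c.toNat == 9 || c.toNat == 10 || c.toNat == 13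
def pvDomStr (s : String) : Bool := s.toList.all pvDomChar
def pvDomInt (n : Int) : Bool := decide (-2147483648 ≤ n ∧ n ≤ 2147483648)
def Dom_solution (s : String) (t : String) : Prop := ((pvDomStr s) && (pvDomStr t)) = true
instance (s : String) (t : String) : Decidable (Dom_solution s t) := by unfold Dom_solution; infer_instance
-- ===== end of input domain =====

-- B replaces A's forward scan (parity offset + skip-toggle state) by a backward two-pointer
-- greedy with no parity computation and no toggle (simpler); equal return value proved below.

-- ===== PORT A =====
-- literal port of A: parity offset (n-m)&1 (only reached when n ≥ m, where &1 = mod 2),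
-- then the for-loop as a fold over range(...) with state (q, k); s[i] and t[q] are in
-- range wherever the Python reads them, so pyGetD with an arbitrary default is exact.
def solution (s : String) (t : String) : String :=
  if t.toList = [] then "YES"
  else
    let n : Int := PySem.Str.len s
    let m : Int := PySem.Str.len t
    if n < m then "NO"
    else
      let qk :=
        (PySem.List.pyRange (PySem.Int.mod (n - m) 2) n 1).foldl
          (fun (qk : Int × Int) (i : Int) =>
            if qk.2 = 1 then (qk.1, 0)
            else if qk.1 < m ∧ PySem.List.pyGetD s.toList i ' ' = PySem.List.pyGetD t.toList qk.1 ' '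
            then (qk.1 + 1, qk.2)
            else (qk.1, qk.2 + 1))
          (0, 0)
      if qk.1 = m then "YES" else "NO"

-- ===== PORT B =====
-- literal port of B's while-loop: i walks s backwards, j walks t backwards; s[i] and t[j]
-- are in range wherever read (0 ≤ i tested, 0 ≤ j tested), so pyGetD is exact.
def bloopB (s : String) (t : String) (j : Int) (i : Int) : Int :=
  if 0 ≤ i then
    if 0 ≤ j ∧ PySem.List.pyGetD s.toList i ' ' = PySem.List.pyGetD t.toList j ' ' then
      bloopB s t (j - 1) (i - 1)
    else
      bloopB s t j (i - 2)
  else j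
termination_by (i + 1).toNat
decreasing_by all_goals omega

def solution_alt (s : String) (t : String) : String :=
  if t.toList = [] then "YES"
  else
    let j := bloopB s t (PySem.Str.len t - 1) (PySem.Str.len s - 1)
    if j < 0 then "YES" else "NO"

-- ===== PRECONDITION & SPEC =====
def Spec_solution (s : String) (t : String) (out : String) : Prop := out = solution_alt s t
instance (s : String) (t : String) (out : String) : Decidable (Spec_solution s t out) := by unfold Spec_solution; infer_instance

-- ===== CLAIM (what is proved, stated in full; the proofs are below) =====
def Claim_equal_solution : Prop := ∀ (s : String) (t : String), Dom_solution s t → Spec_solution s t (solution s t)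

-- ===== LEMMAS AND PROOFS =====

-- deterministic forward greedy: match head or drop two; characterises both loops
def fwdG : List Char → List Char → Bool
  | _, [] => true
  | [], _ :: _ => false
  | c :: l, c' :: t' =>
      if c = c' then fwdG l t'
      else
        match l with
        | [] => false
        | _ :: l2 => fwdG l2 (c' :: t')

theorem fwdG_tnil (l : List Char) : fwdG l [] = true := by cases l <;> rfl

theorem fwdG_nil_cons (c : Char) (t : List Char) : fwdG [] (c :: t) = false := rfl

theorem fwdG_cons_eq {c c' : Char} (l t' : List Char) (h : c = c') :
    fwdG (c :: l) (c' :: t') = fwdG l t' := by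
  cases l <;> simp [fwdG, h]

theorem fwdG_cons_ne {c c' : Char} (l t' : List Char) (h : ¬ c = c') :
    fwdG (c :: l) (c' :: t') = fwdG l.tail (c' :: t') := by
  cases l with
  | nil => simp [fwdG, h, fwdG_nil_cons]
  | cons d l2 => simp [fwdG, h]

-- nondeterministic version of the same greedy: mismatched blocks come in pairs
inductive Emb : List Char → List Char → Prop where
  | nil (l : List Char) : Emb l []
  | take (c : Char) (l t : List Char) : Emb l t → Emb (c :: l) (c :: t)
  | skip (c d : Char) (l t : List Char) : Emb l t → Emb (c :: d :: l) t

theorem emb_nil_inv (t : List Char) (h : Emb [] t) : t = [] := by cases h; rfl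

theorem emb_len (l t : List Char) (h : Emb l t) : t.length ≤ l.length := by
  induction h with
  | nil => simp
  | take c l t h ih => simpa using ih
  | skip c d l t h ih => simp; omega

-- pushing one junk char in front after peeling the first match
theorem emb_push (l t0 : List Char) (h : Emb l t0) :
    ∀ (c : Char) (t : List Char) (d : Char), t0 = c :: t → Emb (d :: l) t := by
  induction h with
  | nil l => intro c t d ht; exact absurd ht (by simp)
  | take c0 l0 t0 h0 ih =>
      intro c t d ht
      injection ht with h1 h2
      exact Emb.skip d c0 l0 t (h2 ▸ h0)
  | skip c1 c2 l0 t0 h0 ih =>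
      intro c t d ht
      exact Emb.skip d c1 (c2 :: l0) t (ih c t c2 ht)

-- greedy exchange: if the heads agree, taking the match is complete
theorem emb_exch (c : Char) (l t : List Char) (h : Emb (c :: l) (c :: t)) : Emb l t := by
  cases h with
  | take _ _ _ h0 => exact h0
  | skip _ _ _ _ h0 => exact emb_push _ _ h0 c t _ rfl

theorem fwd_of_emb : ∀ (fuel : Nat) (l t : List Char), l.length ≤ fuel →
    Emb l t → fwdG l t = true := by
  intro fuel
  induction fuel with
  | zero =>
      intro l t hl h
      have : l = [] := by cases l <;> simp_all
      subst this
      rw [emb_nil_inv _ h, fwdG_tnil]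
  | succ fuel ih =>
      intro l t hl h
      cases t with
      | nil => exact fwdG_tnil l
      | cons c' t' =>
          cases l with
          | nil => exact absurd (emb_nil_inv _ h) (by simp)
          | cons c l' =>
              simp only [List.length_cons] at hl
              by_cases hc : c = c'
              · rw [fwdG_cons_eq _ _ hc]
                subst hc
                exact ih l' t' (by omega) (emb_exch _ _ _ h)
              · rw [fwdG_cons_ne _ _ hc]
                cases h with
                | take => exact absurd rfl hc
                | skip _ _ l0 _ h0 =>
                    simp only [List.tail_cons]
                    exact ih l0 (c' :: t') (by simp at hl; omega) h0

theorem emb_of_fwd : ∀ (fuel : Nat) (l t : List Char), l.length ≤ fuel →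
    fwdG l t = true → Emb l t := by
  intro fuel
  induction fuel with
  | zero =>
      intro l t hl h
      have : l = [] := by cases l <;> simp_all
      subst this
      cases t with
      | nil => exact Emb.nil []
      | cons c' t' => rw [fwdG_nil_cons] at h; exact absurd h (by simp)
  | succ fuel ih =>
      intro l t hl h
      cases t with
      | nil => exact Emb.nil l
      | cons c' t' =>
          cases l with
          | nil => rw [fwdG_nil_cons] at h; exact absurd h (by simp)
          | cons c l' =>
              simp only [List.length_cons] at hl
              by_cases hc : c = c'
              · rw [fwdG_cons_eq _ _ hc] at h
                subst hc
                exact Emb.take _ _ _ (ih l' t' (by omega) h)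
              · rw [fwdG_cons_ne _ _ hc] at h
                cases l' with
                | nil => rw [List.tail_nil, fwdG_nil_cons] at h; exact absurd h (by simp)
                | cons d l0 =>
                    rw [List.tail_cons] at h
                    exact Emb.skip c d l0 _ (ih l0 (c' :: t') (by simp at hl; omega) h)

theorem emb_iff_fwd (l t : List Char) : Emb l t ↔ fwdG l t = true :=
  ⟨fwd_of_emb l.length l t le_rfl, emb_of_fwd l.length l t le_rfl⟩

theorem emb_append_right (l l' t : List Char) (h : Emb l t) : Emb (l ++ l') t := by
  induction h with
  | nil l0 => exact Emb.nil _
  | take c l0 t0 h0 ih => exact Emb.take c _ _ ih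
  | skip c d l0 t0 h0 ih => exact Emb.skip c d _ _ ih

theorem emb_prepend_even : ∀ (l l' t : List Char), l.length % 2 = 0 → Emb l' t → Emb (l ++ l') t
  | [], _, _, _, h => h
  | [a], _, _, hp, _ => by simp at hp
  | a :: b :: rest, l', t, hp, h =>
      Emb.skip a b _ t (emb_prepend_even rest l' t
        (by simp only [List.length_cons] at hp; omega) h)

theorem emb_take_back (l t : List Char) (c : Char) (h : Emb l t) :
    l.length % 2 = t.length % 2 → Emb (l ++ [c]) (t ++ [c]) := by
  induction h with
  | nil l0 =>
      intro hp
      simp only [List.length_nil] at hp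
      exact emb_prepend_even l0 [c] [c] (by omega) (Emb.take c [] [] (Emb.nil []))
  | take c0 l0 t0 h0 ih =>
      intro hp
      simp only [List.length_cons] at hp
      exact Emb.take c0 _ _ (ih (by omega))
  | skip c1 c2 l0 t0 h0 ih =>
      intro hp
      simp only [List.length_cons] at hp
      exact Emb.skip c1 c2 _ _ (ih (by omega))

theorem emb_rev (l t : List Char) (h : Emb l t) :
    l.length % 2 = t.length % 2 → Emb l.reverse t.reverse := by
  induction h with
  | nil l0 => intro _; exact Emb.nil _
  | take c0 l0 t0 h0 ih =>
      intro hp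
      simp only [List.length_cons] at hp
      simp only [List.reverse_cons]
      exact emb_take_back _ _ _ (ih (by omega)) (by simp; omega)
  | skip c1 c2 l0 t0 h0 ih =>
      intro hp
      simp only [List.length_cons] at hp
      have hrw : (c1 :: c2 :: l0).reverse = l0.reverse ++ [c2, c1] := by simp
      rw [hrw]
      exact emb_append_right _ _ _ (ih (by omega))

theorem emb_rev_iff (l t : List Char) (hp : l.length % 2 = t.length % 2) :
    Emb l t ↔ Emb l.reverse t.reverse := by
  constructor
  · intro h; exact emb_rev l t h hp
  · intro h
    have := emb_rev l.reverse t.reverse h (by simpa using hp)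
    simpa using this

-- a trailing char at mismatched parity is never used: it can be dropped
theorem emb_dropLast (L t : List Char) (h : Emb L t) :
    ∀ (l : List Char) (c : Char), L = l ++ [c] → l.length % 2 = t.length % 2 → Emb l t := by
  induction h with
  | nil l0 => intro l c hL hp; exact Emb.nil l
  | take c0 l0 t0 h0 ih =>
      intro l c hL hp
      cases l with
      | nil =>
          simp at hL
          obtain ⟨rfl, rfl⟩ := hL
          have ht0 := emb_nil_inv _ h0
          subst ht0
          simp at hp
      | cons a l' =>
          simp at hL
          obtain ⟨rfl, hL2⟩ := hL
          simp only [List.length_cons] at hp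
          exact Emb.take c0 _ _ (ih l' c hL2 (by omega))
  | skip c1 c2 l0 t0 h0 ih =>
      intro l c hL hp
      cases l with
      | nil => simp at hL
      | cons a l1 =>
          cases l1 with
          | nil =>
              simp at hL
              obtain ⟨rfl, rfl, rfl⟩ := hL
              have ht0 := emb_nil_inv _ h0
              subst ht0
              exact Emb.nil _
          | cons b l' =>
              simp at hL
              obtain ⟨rfl, rfl, hL3⟩ := hL
              simp only [List.length_cons] at hp
              exact Emb.skip _ _ _ _ (ih l' c hL3 (by omega))

-- ===== characterisation of A's loop =====

def stepA (T : List Char) (qk : Int × Int) (c : Char) : Int × Int :=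
  if qk.2 = 1 then (qk.1, 0)
  else if qk.1 < (T.length : Int) ∧ c = PySem.List.pyGetD T qk.1 ' ' then (qk.1 + 1, qk.2)
  else (qk.1, qk.2 + 1)

theorem stepA_const_m (T : List Char) :
    ∀ (l : List Char) (k : Int), (l.foldl (stepA T) ((T.length : Int), k)).1 = (T.length : Int) := by
  intro l
  induction l with
  | nil => intro k; rfl
  | cons c l ih =>
      intro k
      simp only [List.foldl_cons, stepA]
      by_cases hk : k = 1
      · subst hk; rw [if_pos rfl]; exact ih 0
      · rw [if_neg hk, if_neg (by intro hc; exact absurd hc.1 (by omega))]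
        exact ih (k + 1)

theorem loopA_aux : ∀ (fuel : Nat) (l T : List Char) (q : Nat), l.length ≤ fuel → q ≤ T.length →
    ((l.foldl (stepA T) ((q : Int), 0)).1 = (T.length : Int) ↔ fwdG l (T.drop q) = true) := by
  intro fuel
  induction fuel with
  | zero =>
      intro l T q hl hq
      have : l = [] := by cases l <;> simp_all
      subst this
      simp only [List.foldl_nil]
      rcases Nat.lt_or_ge q T.length with hlt | hge
      · rw [List.drop_eq_getElem_cons hlt, fwdG_nil_cons]
        simp only [Bool.false_eq_true, iff_false]
        omega
      · have : q = T.length := by omega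
        subst this
        rw [List.drop_length, fwdG_tnil]
        simp
  | succ fuel ih =>
      intro l T q hl hq
      cases l with
      | nil =>
          simp only [List.foldl_nil]
          rcases Nat.lt_or_ge q T.length with hlt | hge
          · rw [List.drop_eq_getElem_cons hlt, fwdG_nil_cons]
            simp only [Bool.false_eq_true, iff_false]
            omega
          · have : q = T.length := by omega
            subst this
            rw [List.drop_length, fwdG_tnil]
            simp
      | cons c l' =>
          simp only [List.length_cons] at hl
          simp only [List.foldl_cons]
          rcases Nat.lt_or_ge q T.length with hlt | hge
          · have hdrop : T.drop q = T[q] :: T.drop (q + 1) := List.drop_eq_getElem_cons hlt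
            have hget : PySem.List.pyGetD T ((q : Nat) : Int) ' ' = T[q] := by
              rw [PySem.List.pyGetD_eq_getElem T ' ' (by omega) (by exact_mod_cast Nat.cast_lt.mpr hlt)]
              simp
            by_cases hc : c = T[q]
            · have hcond : ((q : Int) < (T.length : Int) ∧
                  c = PySem.List.pyGetD T (q : Int) ' ') := ⟨by omega, by rw [hget]; exact hc⟩
              simp only [stepA, if_neg (by omega : ¬ ((0:Int) = 1)), if_pos hcond]
              have hcast : ((q : Int) + 1) = ((q + 1 : Nat) : Int) := by push_cast; ring
              rw [hcast, hdrop, fwdG_cons_eq _ _ hc]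
              exact ih l' T (q + 1) (by omega) (by omega)
            · have hcond : ¬ ((q : Int) < (T.length : Int) ∧
                  c = PySem.List.pyGetD T (q : Int) ' ') := by
                intro hcc; exact hc (by rw [← hget]; exact hcc.2)
              simp only [stepA, if_neg (by omega : ¬ ((0:Int) = 1)), if_neg hcond]
              rw [hdrop, fwdG_cons_ne _ _ hc]
              cases l' with
              | nil =>
                  simp only [List.foldl_nil, List.tail_nil, fwdG_nil_cons]
                  simp only [Bool.false_eq_true, iff_false]
                  omega
              | cons d l0 =>
                  simp only [List.foldl_cons]
                  simp only [stepA]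
                  simp only [List.length_cons] at hl
                  rw [List.tail_cons, ← hdrop]
                  exact ih l0 T q (by omega) (by omega)
          · have hqe : q = T.length := by omega
            subst hqe
            have hcond : ¬ (((T.length : Nat) : Int) < (T.length : Int) ∧
                c = PySem.List.pyGetD T ((T.length : Nat) : Int) ' ') := by
              intro hcc; exact absurd hcc.1 (by omega)
            simp only [stepA, if_neg (by omega : ¬ ((0:Int) = 1)), if_neg hcond]
            rw [List.drop_length, fwdG_tnil]
            simpa using stepA_const_m T l' (0 + 1)

theorem loopA_eq_fwd (l T : List Char) (q : Nat) (hq : q ≤ T.length) :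
    ((l.foldl (stepA T) ((q : Int), 0)).1 = (T.length : Int) ↔ fwdG l (T.drop q) = true) :=
  loopA_aux l.length l T q le_rfl hq

-- ===== characterisation of B's loop =====

theorem bloop_neg (s t : String) : ∀ (fuel : Nat) (i j : Int), (i + 1).toNat ≤ fuel → j < 0 →
    bloopB s t j i = j := by
  intro fuel
  induction fuel with
  | zero =>
      intro i j hf hj
      rw [bloopB, if_neg (by omega)]
  | succ fuel ih =>
      intro i j hf hj
      rw [bloopB]
      by_cases hi : 0 ≤ i
      · rw [if_pos hi, if_neg (by intro hc; omega)]
        exact ih (i - 2) j (by omega) hj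
      · rw [if_neg hi]

theorem take_succ_reverse (L : List Char) (k : Nat) (hk : k < L.length) :
    (L.take (k + 1)).reverse = L[k] :: (L.take k).reverse := by
  rw [List.take_add_one, List.getElem?_eq_getElem hk]
  simp

theorem bloop_lt_iff (s t : String) : ∀ (fuel : Nat) (i j : Int), (i + 1).toNat ≤ fuel →
    -1 ≤ i → i < (s.toList.length : Int) → -1 ≤ j → j < (t.toList.length : Int) →
    (bloopB s t j i < 0 ↔
      fwdG ((s.toList.take (i + 1).toNat).reverse) ((t.toList.take (j + 1).toNat).reverse) = true) := by
  intro fuel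
  induction fuel with
  | zero =>
      intro i j hf hi1 hi2 hj1 hj2
      have hi : i = -1 := by omega
      subst hi
      rw [bloopB, if_neg (by omega)]
      rw [show ((-1 : Int) + 1).toNat = 0 by omega]
      rw [List.take_zero, List.reverse_nil]
      rcases Int.lt_or_le j 0 with hj | hj
      · have : j = -1 := by omega
        subst this
        rw [show ((-1 : Int) + 1).toNat = 0 by omega]
        rw [List.take_zero, List.reverse_nil, fwdG_tnil]
        simp
      · obtain ⟨c, r, hc⟩ : ∃ c r, (t.toList.take (j + 1).toNat).reverse = c :: r := by
          cases hh : (t.toList.take (j + 1).toNat).reverse with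
          | nil =>
              exfalso
              have hlen := congrArg List.length hh
              rw [List.length_reverse, List.length_take, List.length_nil] at hlen
              omega
          | cons c r => exact ⟨c, r, rfl⟩
        rw [hc, fwdG_nil_cons]
        simp only [Bool.false_eq_true, iff_false]
        omega
  | succ fuel ih =>
      intro i j hf hi1 hi2 hj1 hj2
      rcases Int.lt_or_le i 0 with hi | hi
      · have hieq : i = -1 := by omega
        subst hieq
        rw [bloopB, if_neg (by omega)]
        rw [show ((-1 : Int) + 1).toNat = 0 by omega]
        rw [List.take_zero, List.reverse_nil]
        rcases Int.lt_or_le j 0 with hj | hj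
        · have : j = -1 := by omega
          subst this
          rw [show ((-1 : Int) + 1).toNat = 0 by omega]
          rw [List.take_zero, List.reverse_nil, fwdG_tnil]
          simp
        · obtain ⟨c, r, hc⟩ : ∃ c r, (t.toList.take (j + 1).toNat).reverse = c :: r := by
            cases hh : (t.toList.take (j + 1).toNat).reverse with
            | nil =>
                exfalso
                have hlen := congrArg List.length hh
                rw [List.length_reverse, List.length_take, List.length_nil] at hlen
                omega
            | cons c r => exact ⟨c, r, rfl⟩
          rw [hc, fwdG_nil_cons]
          simp only [Bool.false_eq_true, iff_false]
          omega
      · -- 0 ≤ i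
        have hsrev : (s.toList.take (i + 1).toNat).reverse
            = s.toList[i.toNat] :: (s.toList.take i.toNat).reverse := by
          rw [show (i + 1).toNat = i.toNat + 1 by omega]
          exact take_succ_reverse _ _ (by omega)
        rcases Int.lt_or_le j 0 with hj | hj
        · have : j = -1 := by omega
          subst this
          rw [bloop_neg s t (fuel + 1) i (-1) hf (by omega)]
          rw [show ((-1 : Int) + 1).toNat = 0 by omega]
          rw [List.take_zero, List.reverse_nil, fwdG_tnil]
          simp
        · -- 0 ≤ j
          have htrev : (t.toList.take (j + 1).toNat).reverse
              = t.toList[j.toNat] :: (t.toList.take j.toNat).reverse := by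
            rw [show (j + 1).toNat = j.toNat + 1 by omega]
            exact take_succ_reverse _ _ (by omega)
          have hgs : PySem.List.pyGetD s.toList i ' ' = s.toList[i.toNat] :=
            PySem.List.pyGetD_eq_getElem s.toList ' ' hi hi2
          have hgt : PySem.List.pyGetD t.toList j ' ' = t.toList[j.toNat] :=
            PySem.List.pyGetD_eq_getElem t.toList ' ' hj hj2
          by_cases hcc : s.toList[i.toNat] = t.toList[j.toNat]
          · rw [bloopB, if_pos hi, if_pos ⟨hj, by rw [hgs, hgt, hcc]⟩]
            rw [hsrev, htrev, fwdG_cons_eq _ _ hcc]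
            have hmain := ih (i - 1) (j - 1) (by omega) (by omega) (by omega) (by omega) (by omega)
            rw [show ((i - 1) + 1).toNat = i.toNat by omega,
                show ((j - 1) + 1).toNat = j.toNat by omega] at hmain
            exact hmain
          · rw [bloopB, if_pos hi, if_neg (by
              intro hc
              exact hcc (by rw [← hgs, ← hgt]; exact hc.2))]
            rw [hsrev, htrev, fwdG_cons_ne _ _ hcc]
            rcases Int.lt_or_le i 1 with hi0 | hi1'
            · -- i = 0 : s side exhausted after this mismatch
              have : i = 0 := by omega
              subst this
              have hb : bloopB s t j (0 - 2) = j := by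
                rw [bloopB, if_neg (by omega)]
              rw [hb]
              rw [show ((0 : Int).toNat) = 0 from rfl, List.take_zero, List.reverse_nil,
                  List.tail_nil, ← htrev]
              rw [htrev, fwdG_nil_cons]
              simp only [Bool.false_eq_true, iff_false]
              omega
            · -- i ≥ 1
              have hs2 : (s.toList.take i.toNat).reverse
                  = s.toList[(i - 1).toNat] :: (s.toList.take (i - 1).toNat).reverse := by
                rw [show i.toNat = (i - 1).toNat + 1 by omega]
                exact take_succ_reverse _ _ (by omega)
              rw [hs2, List.tail_cons, ← htrev]
              have hmain := ih (i - 2) j (by omega) (by omega) (by omega) (by omega) (by omega)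
              rw [show ((i - 2) + 1).toNat = (i - 1).toNat by omega] at hmain
              exact hmain

-- ===== assembly =====

theorem emb_drop_iff_rev (L T : List Char) (hm : T.length ≤ L.length) :
    Emb (L.drop (((L.length : Int) - (T.length : Int)) % 2).toNat) T ↔
      Emb L.reverse T.reverse := by
  set a2 : Nat := (((L.length : Int) - (T.length : Int)) % 2).toNat with ha2
  have ha2b : a2 = (L.length - T.length) % 2 := by omega
  have ha2le : a2 ≤ L.length := by omega
  have hp : (L.drop a2).length % 2 = T.length % 2 := by
    rw [List.length_drop]; omega
  constructor
  · intro h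
    have h1 := emb_rev _ _ h hp
    have h2 := emb_append_right _ ((L.take a2).reverse) _ h1
    have hsplit : L.reverse = (L.drop a2).reverse ++ (L.take a2).reverse := by
      conv_lhs => rw [← List.take_append_drop a2 L]
      rw [List.reverse_append]
    rw [hsplit]
    exact h2
  · intro h
    rcases Nat.eq_zero_or_pos a2 with h0 | h1
    · rw [h0, List.drop_zero]
      have hp0 : L.length % 2 = T.length % 2 := by omega
      exact (emb_rev_iff L T hp0).mpr h
    · have ha21 : a2 = 1 := by omega
      have hL0 : 0 < L.length := by omega
      have hLeq : L = L[0] :: L.drop 1 := by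
        conv_lhs => rw [← List.drop_zero (l := L)]
        exact List.drop_eq_getElem_cons hL0
      have hrev : L.reverse = (L.drop 1).reverse ++ [L[0]] := by
        conv_lhs => rw [hLeq]
        rw [List.reverse_cons]
      have hpar : ((L.drop 1).reverse).length % 2 = (T.reverse).length % 2 := by
        rw [List.length_reverse, List.length_reverse, List.length_drop]; omega
      have h3 : Emb ((L.drop 1).reverse) T.reverse :=
        emb_dropLast _ _ h _ _ hrev hpar
      have hp1 : (L.drop 1).length % 2 = T.length % 2 := by
        rw [List.length_drop]; omega
      rw [ha21]
      exact (emb_rev_iff _ _ hp1).mpr (by simpa using h3)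

theorem solution_spec : Claim_equal_solution := by
  unfold Claim_equal_solution
  intro s t _
  unfold Spec_solution solution solution_alt
  by_cases ht : t.toList = []
  · rw [if_pos ht, if_pos ht]
  · rw [if_neg ht, if_neg ht]
    simp only [PySem.Str.len_eq]
    have hm1 : 1 ≤ t.toList.length := by
      cases hTc : t.toList with
      | nil => exact absurd hTc ht
      | cons a b => simp
    -- B's loop decides Emb s.toList.reverse t.toList.reverse
    have hBiff : bloopB s t ((t.toList.length : Int) - 1) ((s.toList.length : Int) - 1) < 0 ↔
        Emb s.toList.reverse t.toList.reverse := by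
      have hmain := bloop_lt_iff s t (((s.toList.length : Int) - 1) + 1).toNat
        ((s.toList.length : Int) - 1) ((t.toList.length : Int) - 1) le_rfl (by omega) (by omega)
        (by omega) (by omega)
      rw [show (((s.toList.length : Int) - 1) + 1).toNat = s.toList.length by omega,
          show (((t.toList.length : Int) - 1) + 1).toNat = t.toList.length by omega,
          List.take_length, List.take_length] at hmain
      rw [hmain]
      exact (emb_iff_fwd _ _).symm
    by_cases hnm : (s.toList.length : Int) < (t.toList.length : Int)
    · -- A answers NO; B must too, since an embedding needs |t| <= |s|
      rw [if_pos hnm]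
      have hnotB : ¬ bloopB s t ((t.toList.length : Int) - 1) ((s.toList.length : Int) - 1) < 0 := by
        rw [hBiff]
        intro hE
        have hlen := emb_len _ _ hE
        rw [List.length_reverse, List.length_reverse] at hlen
        omega
      rw [if_neg hnotB]
    · rw [if_neg hnm]
      -- A's fold decides Emb (s.toList.drop a2) t.toList
      rw [PySem.Int.mod_eq_emod_of_pos (by omega)]
      show (if (List.foldl
              (fun (acc : Int × Int) (j : Int) => stepA t.toList acc (PySem.List.pyGetD s.toList j ' '))
              ((0 : Int), (0 : Int))
              (PySem.List.pyRange (((s.toList.length : Int) - (t.toList.length : Int)) % 2)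
                (s.toList.length : Int) 1)).1 = ((t.toList.length : Nat) : Int)
          then "YES" else "NO") = _
      have hfold := PySem.List.foldl_pyRange_pyGetD s.toList ' ' (stepA t.toList)
        ((0 : Int), (0 : Int))
        (a := ((s.toList.length : Int) - (t.toList.length : Int)) % 2) (by omega)
      rw [PySem.List.len_eq] at hfold
      rw [hfold]
      have hA := loopA_eq_fwd
        (s.toList.drop (((s.toList.length : Int) - (t.toList.length : Int)) % 2).toNat)
        t.toList 0 (by omega)
      rw [Nat.cast_zero, List.drop_zero] at hA
      have hAiff : ((s.toList.drop (((s.toList.length : Int) - (t.toList.length : Int)) % 2).toNat).foldl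
            (stepA t.toList) (0, 0)).1 = (t.toList.length : Int) ↔
          Emb s.toList.reverse t.toList.reverse := by
        rw [hA, ← emb_iff_fwd]
        exact emb_drop_iff_rev s.toList t.toList (by omega)
      by_cases hE : Emb s.toList.reverse t.toList.reverse
      · rw [if_pos (hAiff.mpr hE), if_pos (hBiff.mpr hE)]
      · rw [if_neg (fun hc => hE (hAiff.mp hc)), if_neg (fun hc => hE (hBiff.mp hc))]
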